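-- pv_equiv track=rewrite | github.com/toutane/codewars-kata | python/8kyu/eureka.py | is_eureka_num
-- ===== SOURCE A (Python) =====
-- def is_eureka_num(n):
--     res = 0
--     fn, i, l = n, 0, len(str(n))
--     while fn > 0:
--         res += pow(fn % 10, l - i)
--         i += 1
--         fn = fn // 10
--     return n == res
-- ===== SOURCE B (Python) =====
-- def is_eureka_num(n):
--     if n < 0:
--         return False
--     return n == sum(int(d) ** (i + 1) for i, d in enumerate(str(n)))
-- ===== Notes on version B (the rewrite author's own statement) =====
-- stated objective: idiomatic
-- what changed: B converts n to a string once and sums int(d)**(i+1) over enumerate(str(n)) left-to-right (guarding negative n), instead of A's right-to-left arithmetic digit peeling with modulo and floor division against a descending exponent.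
import Mathlib
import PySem

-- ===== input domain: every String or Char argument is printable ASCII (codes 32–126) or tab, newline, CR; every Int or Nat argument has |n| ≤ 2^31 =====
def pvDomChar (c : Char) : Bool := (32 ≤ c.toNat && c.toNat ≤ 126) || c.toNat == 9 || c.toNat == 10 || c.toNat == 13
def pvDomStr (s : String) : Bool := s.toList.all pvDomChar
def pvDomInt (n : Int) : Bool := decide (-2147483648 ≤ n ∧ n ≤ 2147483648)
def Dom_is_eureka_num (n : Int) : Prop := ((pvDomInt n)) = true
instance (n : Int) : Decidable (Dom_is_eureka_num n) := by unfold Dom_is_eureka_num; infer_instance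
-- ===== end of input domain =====

-- ===== PORT A =====
-- One honest line: B enumerates the digits of str(n) left-to-right instead of A's arithmetic digit peeling; idiomatic, same cost.
-- A's while loop: state (fn, i, res); l and n are fixed. Exponent l - i is > 0 whenever the loop
-- body runs (i < number of digits of fn <= l), so `.toNat` is exact there.
def eurekaLoopA (l : Int) (fn i res : Int) : Int :=
  if _h : fn > 0 then
    eurekaLoopA l (PySem.Int.floordiv fn 10) (i + 1)
      (res + PySem.Int.mod fn 10 ^ (l - i).toNat)
  else res
  termination_by fn.toNat
  decreasing_by
    simp only [PySem.Int.floordiv_eq_ediv_of_pos (a := fn) (by norm_num : (0:Int) < 10)]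
    omega

def is_eureka_num (n : Int) : Bool :=
  -- res = 0; fn, i, l = n, 0, len(str(n)); while fn > 0: ...; return n == res
  decide (n = eurekaLoopA (PySem.Str.len (PySem.Int.toStr n)) n 0 0)

-- ===== PORT B =====
-- int(d) for a single character d; on the digit characters produced by str(n) (n >= 0) ofChars? is
-- always `some`, so the default is never taken.
def pyIntOfDigit (c : Char) : Int := (PySem.Int.ofChars? [c]).getD 0

def is_eureka_num_alt (n : Int) : Bool :=
  if n < 0 then false
  else
    decide (n = (PySem.List.enumerate (PySem.Int.toStr n).toList).foldl
      (fun acc p => acc + pyIntOfDigit p.2 ^ (p.1 + 1).toNat) 0)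

-- ===== PRECONDITION & SPEC =====
def Spec_is_eureka_num (n : Int) (out : Bool) : Prop := out = is_eureka_num_alt n
instance (n : Int) (out : Bool) : Decidable (Spec_is_eureka_num n out) := by unfold Spec_is_eureka_num; infer_instance

-- ===== CLAIM (what is proved, stated in full; the proofs are below) =====
def Claim_equal_is_eureka_num : Prop := ∀ (n : Int), Dom_is_eureka_num n → Spec_is_eureka_num n (is_eureka_num n)

-- ===== LEMMAS AND PROOFS =====

-- Common reference value: the positional power sum of the decimal digits of m, rightmost digit
-- raised to the power e, descending leftwards.
def digitPowSum (m : Nat) (e : Nat) : Int :=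
  if m = 0 then 0
  else ((m % 10 : Nat) : Int) ^ e + digitPowSum (m / 10) (e - 1)
  termination_by m
  decreasing_by omega

theorem digitPowSum_zero (e : Nat) : digitPowSum 0 e = 0 := by
  unfold digitPowSum; simp

theorem digitPowSum_pos (m e : Nat) (hm : m ≠ 0) :
    digitPowSum m e = ((m % 10 : Nat) : Int) ^ e + digitPowSum (m / 10) (e - 1) := by
  rw [digitPowSum]; simp [hm]

theorem pyIntOfDigit_digitChar (d : Nat) (hd : d < 10) :
    pyIntOfDigit (Nat.digitChar d) = (d : Int) := by
  interval_cases d <;> decide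

theorem length_toDigits_pos' (m : Nat) : 0 < (Nat.toDigits 10 m).length := by
  rcases Nat.lt_or_ge m 10 with h | h
  · rw [Nat.toDigits_of_lt_base h]; simp
  · rw [Nat.toDigits_of_base_le (by norm_num) h]; simp

theorem length_toDigits_div (m : Nat) (h : 10 ≤ m) :
    (Nat.toDigits 10 m).length = (Nat.toDigits 10 (m / 10)).length + 1 := by
  rw [Nat.toDigits_of_base_le (by norm_num) h]; simp

-- A's loop on a nonnegative fn computes the descending power sum, provided the exponent budget
-- l - i is at least the number of digits of fn.
theorem eurekaLoopA_eq (m : Nat) : ∀ (l i res : Int),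
    (m ≠ 0 → ((Nat.toDigits 10 m).length : Int) ≤ l - i) →
    eurekaLoopA l (m : Int) i res = res + digitPowSum m (l - i).toNat := by
  induction m using Nat.strong_induction_on with
  | _ m ih =>
    intro l i res hlen
    rcases Nat.eq_zero_or_pos m with hm | hm
    · subst hm
      rw [eurekaLoopA]
      simp [digitPowSum_zero]
    · have hm' : (0 : Int) < (m : Int) := by exact_mod_cast hm
      rw [eurekaLoopA]
      rw [dif_pos hm']
      have hdig := length_toDigits_pos' m
      have hle := hlen (by omega)
      have hdiv : PySem.Int.floordiv (m : Int) 10 = ((m / 10 : Nat) : Int) := by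
        exact_mod_cast PySem.Int.floordiv_natCast m 10
      have hmod : PySem.Int.mod (m : Int) 10 = ((m % 10 : Nat) : Int) := by
        exact_mod_cast PySem.Int.mod_natCast m 10
      rw [hdiv, hmod]
      rw [ih (m / 10) (by omega) l (i + 1) _ ?_]
      · rw [digitPowSum_pos m (l - i).toNat (by omega)]
        have : (l - (i + 1)).toNat = (l - i).toNat - 1 := by omega
        rw [this]; ring
      · intro hq
        have h10 : 10 ≤ m := by
          by_contra hlt
          have : m / 10 = 0 := Nat.div_eq_of_lt (by omega)
          exact hq this
        have := length_toDigits_div m h10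
        omega

-- B's fold is insensitive to the accumulator start (the step is acc + _).
theorem foldB_acc (ps : List (Int × Char)) : ∀ (acc : Int),
    ps.foldl (fun acc p => acc + pyIntOfDigit p.2 ^ (p.1 + 1).toNat) acc
      = acc + ps.foldl (fun acc p => acc + pyIntOfDigit p.2 ^ (p.1 + 1).toNat) 0 := by
  induction ps with
  | nil => simp
  | cons p ps ih =>
      intro acc
      simp only [List.foldl_cons]
      rw [ih, ih (0 + _)]
      ring

-- B's enumerated fold over the digit string of m computes the same positional power sum,
-- rightmost digit getting exponent = number of digits.
theorem foldB_toDigits (m : Nat) :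
    (PySem.List.enumerate (Nat.toDigits 10 m)).foldl
        (fun acc p => acc + pyIntOfDigit p.2 ^ (p.1 + 1).toNat) 0
      = digitPowSum m (Nat.toDigits 10 m).length := by
  induction m using Nat.strong_induction_on with
  | _ m ih =>
    rcases Nat.lt_or_ge m 10 with h | h
    · rw [Nat.toDigits_of_lt_base h]
      rw [show PySem.List.enumerate [Nat.digitChar m] 0 = [((0 : Int), Nat.digitChar m)] by
        simp [PySem.List.enumerate_cons, PySem.List.enumerate_nil]]
      simp only [List.foldl_cons, List.foldl_nil, List.length_singleton]
      rw [pyIntOfDigit_digitChar m h]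
      rcases Nat.eq_zero_or_pos m with hm | hm
      · subst hm; rw [digitPowSum_zero]; decide
      · rw [digitPowSum_pos m 1 (by omega)]
        have h1 : m % 10 = m := Nat.mod_eq_of_lt h
        have h2 : m / 10 = 0 := Nat.div_eq_of_lt h
        simp [h1, h2, digitPowSum_zero]
    · rw [Nat.toDigits_of_base_le (by norm_num) h]
      rw [PySem.List.enumerate_append]
      rw [List.foldl_append]
      rw [show PySem.List.enumerate [Nat.digitChar (m % 10)] (0 + (Nat.toDigits 10 (m / 10)).length)
            = [(((Nat.toDigits 10 (m / 10)).length : Int), Nat.digitChar (m % 10))] by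
          simp [PySem.List.enumerate_cons, PySem.List.enumerate_nil]]
      simp only [List.foldl_cons, List.foldl_nil]
      rw [foldB_acc]
      rw [ih (m / 10) (by omega)]
      rw [pyIntOfDigit_digitChar (m % 10) (Nat.mod_lt m (by norm_num))]
      rw [digitPowSum_pos m _ (by omega)]
      have hlen : (((Nat.toDigits 10 (m / 10)).length : Int) + 1).toNat
          = (Nat.toDigits 10 (m / 10)).length + 1 := by omega
      rw [hlen]
      simp only [List.length_append, List.length_singleton]
      have : (Nat.toDigits 10 (m / 10)).length + 1 - 1 = (Nat.toDigits 10 (m / 10)).length := by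
        omega
      rw [this]
      ring

-- ===== VERDICT (by name: the statement is the Claim_ definition above) =====
theorem is_eureka_num_spec : Claim_equal_is_eureka_num := by
  intro n _
  unfold Spec_is_eureka_num is_eureka_num is_eureka_num_alt
  rcases lt_or_ge n 0 with hn | hn
  · -- n < 0: A's loop never runs, res = 0, and n == 0 is false
    rw [if_pos hn]
    rw [show eurekaLoopA (PySem.Str.len (PySem.Int.toStr n)) n 0 0 = 0 by
      rw [eurekaLoopA, dif_neg (by omega)]]
    simp [show n ≠ 0 by omega]
  · rw [if_neg (by omega)]
    obtain ⟨m, rfl⟩ : ∃ m : Nat, n = (m : Int) := ⟨n.toNat, by omega⟩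
    have hchars : (PySem.Int.toStr (m : Int)).toList = Nat.toDigits 10 m := by
      rw [PySem.Int.toList_toStr]
      unfold PySem.Int.toChars
      rw [if_neg (by omega)]
      simp
    have hlen : PySem.Str.len (PySem.Int.toStr (m : Int))
        = ((Nat.toDigits 10 m).length : Int) := by
      rw [PySem.Str.len_eq]
      simp [hchars]
    simp only [hlen, hchars]
    rw [eurekaLoopA_eq m _ 0 0 (by intro _; omega)]
    rw [foldB_toDigits m]
    simp
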